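-- pv_equiv track=rewrite | github.com/hariharsubramanyam/vrmfa-backend | src/roomgen/room.py | compute_rotated_room
-- ===== SOURCE A (Python) =====
-- class RoomType:
--     north = 1
--     north_east = 2
--     north_south = 3
--     north_east_south = 4
--     north_east_south_west = 5
--
-- class Rotation:
--     clockwise0 = 0
--     clockwise90 = 90
--     clockwise180 = 180
--     clockwise270 = 270
--
-- def compute_rotated_room(north, east, south, west):
--     # Count the number of doors in the room.
--     num_doors = len([x for x in (north, east, south, west) if x])
--
--     # Handle the error case.
--     if num_doors == 0:
--         raise Exception("You can't have a room with 0 doors!")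
--
--     # Figure out the room type based on the door count (and, if necessary, the arrangement of doors).
--     # Also compute the rotation.
--     room_type = None
--     rotation = None
--     if num_doors == 1:
--         room_type = RoomType.north
--         # Figure out which wall has the single door and rotate accordingly.
--         if north:
--             rotation = Rotation.clockwise0
--         elif east:
--             rotation = Rotation.clockwise90
--         elif south:
--             rotation = Rotation.clockwise180
--         elif west:
--             rotation = Rotation.clockwise270
--     elif num_doors == 3:
--         room_type = RoomType.north_east_south
--         # Figure out which wall does NOT have a door and rotate accordingly.
--         if not west:
--             rotation = Rotation.clockwise0
--         elif not north:
--             rotation = Rotation.clockwise90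
--         elif not east:
--             rotation = Rotation.clockwise180
--         elif not south:
--             rotation = Rotation.clockwise270
--     elif num_doors == 4:
--         room_type = RoomType.north_east_south_west
--         # Since all walls have doors, there's no need to rotate.
--         rotation = Rotation.clockwise0
--     elif num_doors == 2:
--         # In this case, we need to check if the doors are opposite each other or adjacent to each
--         # other.
--         if (north and south) or (east and west):
--             room_type = RoomType.north_south
--             # Figure out which pair of rooms has the doors, then rotate accordingly.
--             if north and south:
--                 rotation = Rotation.clockwise0
--             elif east and west:
--                 rotation = Rotation.clockwise90
--         else:
--             room_type = RoomType.north_east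
--             # Figure out which pair of rooms has the doors, then rotate accordingly.
--             if north and east:
--                 rotation = Rotation.clockwise0
--             elif east and south:
--                 rotation = Rotation.clockwise90
--             elif south and west:
--                 rotation = Rotation.clockwise180
--             elif west and north:
--                 rotation = Rotation.clockwise270
--
--     # Ensure that the above logic managed to compute the room type and rotation.
--     if room_type is None or rotation is None:
--         raise Exception("Failed to compute room type and rotation for (%s, %s, %s, %s)" % (north, east, south, west))
--
--     return room_type, rotation
-- ===== SOURCE B (Python) =====
-- # B: rotation-normalization. Instead of classifying the raw door pattern, rotate the
-- # room counter-clockwise step by step until its doors match one of the five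
-- # north-anchored canonical patterns; the room type is the canonical pattern's type
-- # and the rotation is 90 degrees per step taken.
-- _CANONICAL = {
--     (True, False, False, False): 1,  # north
--     (True, True,  False, False): 2,  # north_east
--     (True, False, True,  False): 3,  # north_south
--     (True, True,  True,  False): 4,  # north_east_south
--     (True, True,  True,  True):  5,  # all four
-- }
--
-- def compute_rotated_room(north, east, south, west):
--     doors = (bool(north), bool(east), bool(south), bool(west))
--     if not any(doors):
--         raise Exception("You can't have a room with 0 doors!")
--     r = 0
--     while doors not in _CANONICAL:
--         # rotate the room counter-clockwise: the east door becomes the north door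
--         doors = doors[1:] + doors[:1]
--         r += 1
--     return _CANONICAL[doors], 90 * r
-- ===== Notes on version B (the rewrite author's own statement) =====
-- stated objective: alternative
-- what changed: Replaced the door-counting branch cascade with a rotation-normalization loop: rotate the door tuple counter-clockwise until it matches one of five north-anchored canonical patterns; the type comes from the canonical pattern and the rotation is 90 degrees per step.
import Mathlib
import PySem

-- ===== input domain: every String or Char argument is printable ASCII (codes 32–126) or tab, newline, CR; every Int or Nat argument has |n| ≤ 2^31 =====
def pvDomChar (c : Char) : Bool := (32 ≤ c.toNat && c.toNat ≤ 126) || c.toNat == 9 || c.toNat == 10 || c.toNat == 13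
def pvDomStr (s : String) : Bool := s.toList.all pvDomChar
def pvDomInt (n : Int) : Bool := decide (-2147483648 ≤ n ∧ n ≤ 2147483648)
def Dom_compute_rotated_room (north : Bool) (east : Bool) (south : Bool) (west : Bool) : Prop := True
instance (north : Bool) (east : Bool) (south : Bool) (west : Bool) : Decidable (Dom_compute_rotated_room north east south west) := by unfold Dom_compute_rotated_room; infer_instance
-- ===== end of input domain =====

-- B replaces A's door-counting branch cascade by a rotate-until-canonical normalization loop (objective: alternative).

-- ===== PORT A =====
-- Literal port of A's branch cascade: count doors, then the same if-chains building
-- (room_type, rotation) as Options; the 'raise' branches (num_doors = 0, and the dead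
-- final check) are outside Pre_, modelled by the (0, 0) fallback.
def compute_rotated_room (north : Bool) (east : Bool) (south : Bool) (west : Bool) : Int × Int :=
  let num_doors : Int := ([north, east, south, west].filter (fun x => x)).length
  let rt_rot : Option Int × Option Int :=
    if num_doors == 1 then
      (some 1,
        if north then some 0
        else if east then some 90
        else if south then some 180
        else if west then some 270
        else none)
    else if num_doors == 3 then
      (some 4,
        if !west then some 0
        else if !north then some 90
        else if !east then some 180
        else if !south then some 270
        else none)
    else if num_doors == 4 then
      (some 5, some 0)
    else if num_doors == 2 then
      if (north && south) || (east && west) then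
        (some 3,
          if north && south then some 0
          else if east && west then some 90
          else none)
      else
        (some 2,
          if north && east then some 0
          else if east && south then some 90
          else if south && west then some 180
          else if west && north then some 270
          else none)
    else (none, none)
  match rt_rot with
  | (some rt, some rot) => (rt, rot)
  | _ => (0, 0)  -- A raises here (num_doors = 0); excluded by Pre_

-- ===== PORT B =====
-- B's canonical-pattern table: the five north-anchored door patterns and their room types.
def pvCanonical (doors : Bool × Bool × Bool × Bool) : Option Int :=
  if doors = (true, false, false, false) then some 1
  else if doors = (true, true, false, false) then some 2
  else if doors = (true, false, true, false) then some 3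
  else if doors = (true, true, true, false) then some 4
  else if doors = (true, true, true, true) then some 5
  else none

-- B's while loop: rotate counter-clockwise (east door becomes north door) until
-- canonical; fuel 4 bounds the loop (under Pre_ it finds a canonical form in ≤ 3 steps).
def pvNormalize (fuel : Nat) (doors : Bool × Bool × Bool × Bool) (r : Int) : Int × Int :=
  match pvCanonical doors with
  | some t => (t, 90 * r)
  | none =>
    match fuel with
    | 0 => (0, 0)  -- unreachable under Pre_ (every nonzero pattern normalizes)
    | fuel' + 1 => pvNormalize fuel' (doors.2.1, doors.2.2.1, doors.2.2.2, doors.1) (r + 1)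

def compute_rotated_room_alt (north : Bool) (east : Bool) (south : Bool) (west : Bool) : Int × Int :=
  -- all-false doors raise in B; excluded by Pre_
  pvNormalize 4 (north, east, south, west) 0

-- ===== PRECONDITION & SPEC =====
-- Pre_ excludes exactly the all-false input, on which both A and B raise Exception ("0 doors").
def Pre_compute_rotated_room (north : Bool) (east : Bool) (south : Bool) (west : Bool) : Prop :=
  north || east || south || west
instance (north : Bool) (east : Bool) (south : Bool) (west : Bool) : Decidable (Pre_compute_rotated_room north east south west) := by unfold Pre_compute_rotated_room; infer_instance
def pvWitness_compute_rotated_room : Bool × Bool × Bool × Bool := (true, false, true, false)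
def Spec_compute_rotated_room (north : Bool) (east : Bool) (south : Bool) (west : Bool) (out : Int × Int) : Prop := out = compute_rotated_room_alt north east south west
instance (north : Bool) (east : Bool) (south : Bool) (west : Bool) (out : Int × Int) : Decidable (Spec_compute_rotated_room north east south west out) := by unfold Spec_compute_rotated_room; infer_instance

-- ===== CLAIM =====
def Claim_equal_compute_rotated_room : Prop := ∀ (north : Bool) (east : Bool) (south : Bool) (west : Bool), Dom_compute_rotated_room north east south west → Pre_compute_rotated_room north east south west → Spec_compute_rotated_room north east south west (compute_rotated_room north east south west)

-- ===== LEMMAS AND PROOFS =====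

-- ===== VERDICT =====
theorem compute_rotated_room_spec : Claim_equal_compute_rotated_room := by
  unfold Claim_equal_compute_rotated_room; decide
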